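-- pv_equiv track=rewrite | github.com/natkramarz/aoc2020 | day 5/1.py | check_highest_seat
-- ===== SOURCE A (Python) =====
-- def check_highest_seat(array, ptr):
--     upper = []
--     lower = []
--     for i in range(0, len(array)):
--         if array[i][ptr] == 'R':
--             upper.append(array[i])
--         elif array[i][ptr] == 'L':
--             lower.append(array[i])
--     if len(upper) != 0:
--         return upper
--     return lower
-- ===== SOURCE B (Python) =====
-- def check_highest_seat(array, ptr):
--     target = 'R' if any(x[ptr] == 'R' for x in array) else 'L'
--     return [x for x in array if x[ptr] == target]
-- ===== Notes on version B (the rewrite author's own statement) =====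
-- stated objective: idiomatic
-- what changed: Replaces the two-accumulator partition pass (build upper and lower, return the nonempty one) with a boolean any-scan that picks the target character followed by a single filter.
import Mathlib
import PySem

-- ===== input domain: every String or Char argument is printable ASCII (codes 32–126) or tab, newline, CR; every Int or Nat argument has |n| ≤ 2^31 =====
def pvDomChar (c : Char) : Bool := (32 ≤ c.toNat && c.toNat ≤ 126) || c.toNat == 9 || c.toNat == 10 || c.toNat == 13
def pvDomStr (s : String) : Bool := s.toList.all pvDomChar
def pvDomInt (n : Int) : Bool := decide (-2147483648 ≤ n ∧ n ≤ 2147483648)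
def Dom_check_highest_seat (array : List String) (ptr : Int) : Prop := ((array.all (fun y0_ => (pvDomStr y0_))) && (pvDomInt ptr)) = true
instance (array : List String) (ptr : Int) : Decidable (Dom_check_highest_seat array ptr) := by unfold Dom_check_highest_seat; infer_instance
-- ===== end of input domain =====

-- B replaces A's two-accumulator partition (build upper and lower, return the nonempty one)
-- with an any-scan choosing the target character followed by a single filter (idiomatic; same cost).

-- ===== PORT A =====
def check_highest_seat (array : List String) (ptr : Int) : List String :=
  let p := array.foldl (fun (acc : List String × List String) x =>
    if PySem.Str.pyGet? x ptr = some 'R' then (acc.1 ++ [x], acc.2)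
    else if PySem.Str.pyGet? x ptr = some 'L' then (acc.1, acc.2 ++ [x])
    else acc) ([], [])
  if p.1.length ≠ 0 then p.1 else p.2

-- ===== PORT B =====
def check_highest_seat_alt (array : List String) (ptr : Int) : List String :=
  let target : Char := if array.any (fun x => PySem.Str.pyGet? x ptr = some 'R') then 'R' else 'L'
  array.filter (fun x => PySem.Str.pyGet? x ptr = some target)

-- ===== PRECONDITION & SPEC =====
-- Pre_ excludes exactly the inputs where Python raises IndexError: ptr must be a valid
-- (possibly negative) index into every string of the list.
def Pre_check_highest_seat (array : List String) (ptr : Int) : Prop :=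
  ∀ s ∈ array, (PySem.Str.pyGet? s ptr).isSome
instance (array : List String) (ptr : Int) : Decidable (Pre_check_highest_seat array ptr) := by unfold Pre_check_highest_seat; infer_instance
def pvWitness_check_highest_seat : List String × Int := (["RL", "LR"], 0)

def Spec_check_highest_seat (array : List String) (ptr : Int) (out : List String) : Prop := out = check_highest_seat_alt array ptr
instance (array : List String) (ptr : Int) (out : List String) : Decidable (Spec_check_highest_seat array ptr out) := by unfold Spec_check_highest_seat; infer_instance

-- ===== CLAIM (what is proved, stated in full; the proofs are below) =====
def Claim_equal_check_highest_seat : Prop := ∀ (array : List String) (ptr : Int), Dom_check_highest_seat array ptr → Pre_check_highest_seat array ptr → Spec_check_highest_seat array ptr (check_highest_seat array ptr)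

-- ===== LEMMAS AND PROOFS =====

-- A's fold appends each element to the R-accumulator or the L-accumulator: it computes
-- the two corresponding filters appended to the starting accumulators.
theorem pv_fold_eq_filters (ptr : Int) (xs : List String) : ∀ (u l : List String),
    xs.foldl (fun (acc : List String × List String) x =>
      if PySem.Str.pyGet? x ptr = some 'R' then (acc.1 ++ [x], acc.2)
      else if PySem.Str.pyGet? x ptr = some 'L' then (acc.1, acc.2 ++ [x])
      else acc) (u, l)
    = (u ++ xs.filter (fun x => PySem.Str.pyGet? x ptr = some 'R'),
       l ++ xs.filter (fun x => PySem.Str.pyGet? x ptr = some 'L')) := by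
  induction xs with
  | nil => intro u l; simp
  | cons x xs ih =>
    intro u l
    rw [List.foldl_cons]
    by_cases hR : PySem.Str.pyGet? x ptr = some 'R'
    · rw [if_pos hR, ih, List.filter_cons, List.filter_cons]
      replace hR : PySem.List.pyGet? x.toList ptr = some 'R' := hR
      simp [hR]
    · by_cases hL : PySem.Str.pyGet? x ptr = some 'L'
      · rw [if_neg hR, if_pos hL, ih, List.filter_cons, List.filter_cons]
        replace hR : ¬ PySem.List.pyGet? x.toList ptr = some 'R' := hR
        replace hL : PySem.List.pyGet? x.toList ptr = some 'L' := hL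
        simp [hR, hL]
      · rw [if_neg hR, if_neg hL, ih, List.filter_cons, List.filter_cons]
        replace hR : ¬ PySem.List.pyGet? x.toList ptr = some 'R' := hR
        replace hL : ¬ PySem.List.pyGet? x.toList ptr = some 'L' := hL
        simp [hR, hL]

theorem pv_filterR_ne_nil_iff_any (ptr : Int) (xs : List String) :
    (xs.filter (fun x => PySem.Str.pyGet? x ptr = some 'R') ≠ []) ↔
    xs.any (fun x => PySem.Str.pyGet? x ptr = some 'R') = true := by
  rw [Ne, List.filter_eq_nil_iff, List.any_eq_true]
  simp

-- ===== VERDICT (by name: the statement is the Claim_ definition above) =====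
theorem check_highest_seat_spec : Claim_equal_check_highest_seat := by
  intro array ptr _ _
  show check_highest_seat array ptr = check_highest_seat_alt array ptr
  unfold check_highest_seat check_highest_seat_alt
  rw [pv_fold_eq_filters]
  simp only [List.nil_append]
  by_cases hA : array.any (fun x => PySem.Str.pyGet? x ptr = some 'R') = true
  · have hne := (pv_filterR_ne_nil_iff_any ptr array).mpr hA
    have hlen : (array.filter (fun x => PySem.Str.pyGet? x ptr = some 'R')).length ≠ 0 := by
      simpa [List.length_eq_zero_iff] using hne
    rw [if_pos hlen, if_pos hA]
  · have heq : array.filter (fun x => PySem.Str.pyGet? x ptr = some 'R') = [] := by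
      by_contra hc
      exact hA ((pv_filterR_ne_nil_iff_any ptr array).mp hc)
    have hlen : ¬ ((array.filter (fun x => PySem.Str.pyGet? x ptr = some 'R')).length ≠ 0) := by
      rw [heq]; simp
    rw [if_neg hlen, if_neg hA]
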